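-- pv_equiv track=rewrite | github.com/dark-14100/floatchat | floatchai-ai/floatchat/backend/app/export/csv_export.py | _ordered_columns
-- ===== SOURCE A (Python) =====
-- from typing import Any
--
-- _BASE_COLUMN_ORDER = [
--     "profile_id",
--     "float_id",
--     "platform_number",
--     "juld_timestamp",
--     "latitude",
--     "longitude",
--     "pressure",
-- ]
--
-- _VARIABLE_COLUMN_ORDER = [
--     "temperature",
--     "salinity",
--     "dissolved_oxygen",
--     "chlorophyll",
--     "nitrate",
--     "ph",
-- ]
--
-- _QC_COLUMN_ORDER = [
--     "temp_qc",
--     "psal_qc",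
--     "doxy_qc",
--     "chla_qc",
--     "nitrate_qc",
--     "ph_qc",
-- ]
--
-- def _present_columns(rows: list[dict[str, Any]], columns: list[str]) -> list[str]:
--     seen: dict[str, None] = {}
--     for column in columns:
--         seen[column] = None
--     for row in rows:
--         for key in row.keys():
--             seen[key] = None
--     return list(seen.keys())
--
-- def _ordered_columns(rows: list[dict[str, Any]], columns: list[str]) -> list[str]:
--     present = _present_columns(rows, columns)
--     present_set = set(present)
--
--     ordered: list[str] = []
--
--     for column in _BASE_COLUMN_ORDER:
--         if column in present_set:
--             ordered.append(column)
--
--     for column in _VARIABLE_COLUMN_ORDER: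
--         if column in present_set:
--             ordered.append(column)
--
--     for column in _QC_COLUMN_ORDER:
--         if column in present_set:
--             ordered.append(column)
--
--     for column in present:
--         if column not in ordered:
--             ordered.append(column)
--
--     return ordered
-- ===== SOURCE B (Python) =====
-- # B: build present once by ordered dedup, then ONE stable sort by a precomputed
-- # injective integer key (priority rank, or len(rank)+position for extras).
-- _BASE_COLUMN_ORDER = [
--     "profile_id",
--     "float_id",
--     "platform_number",
--     "juld_timestamp",
--     "latitude",
--     "longitude",
--     "pressure",
-- ]
--
-- _VARIABLE_COLUMN_ORDER = [
--     "temperature",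
--     "salinity",
--     "dissolved_oxygen",
--     "chlorophyll",
--     "nitrate",
--     "ph",
-- ]
--
-- _QC_COLUMN_ORDER = [
--     "temp_qc",
--     "psal_qc",
--     "doxy_qc",
--     "chla_qc",
--     "nitrate_qc",
--     "ph_qc",
-- ]
--
-- _PRIORITY_RANK = {
--     column: index
--     for index, column in enumerate(
--         _BASE_COLUMN_ORDER + _VARIABLE_COLUMN_ORDER + _QC_COLUMN_ORDER
--     )
-- }
--
--
-- def _ordered_columns(rows, columns):
--     present = list(dict.fromkeys(list(columns) + [key for row in rows for key in row]))
--     big = len(_PRIORITY_RANK)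
--     keyed = {
--         column: _PRIORITY_RANK.get(column, big + index)
--         for index, column in enumerate(present)
--     }
--     return sorted(present, key=keyed.__getitem__)
-- ===== Notes on version B (the rewrite author's own statement) =====
-- stated objective: faster
-- what changed: Replaces A's three priority scans plus a final loop with a linear scan of the growing output list by one ordered dedup and a single stable sort of the present columns under a precomputed injective integer key (priority rank, or rank-table size + present position for extras).
import Mathlib
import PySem

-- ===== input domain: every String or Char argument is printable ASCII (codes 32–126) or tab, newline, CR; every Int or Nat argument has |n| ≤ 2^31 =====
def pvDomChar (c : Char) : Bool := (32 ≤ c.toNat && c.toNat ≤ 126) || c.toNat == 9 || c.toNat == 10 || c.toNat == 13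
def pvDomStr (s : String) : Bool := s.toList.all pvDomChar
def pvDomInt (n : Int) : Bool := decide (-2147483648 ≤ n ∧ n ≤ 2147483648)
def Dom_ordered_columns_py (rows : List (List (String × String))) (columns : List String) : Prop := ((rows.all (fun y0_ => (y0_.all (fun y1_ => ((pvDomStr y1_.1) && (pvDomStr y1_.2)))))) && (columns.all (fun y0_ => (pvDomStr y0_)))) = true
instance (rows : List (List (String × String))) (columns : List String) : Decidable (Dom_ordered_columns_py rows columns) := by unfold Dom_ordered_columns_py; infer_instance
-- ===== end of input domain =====

-- B replaces A's four conditional-append loops by one ordered dedup plus one stable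
-- sort under a precomputed injective integer key (priority rank, or rank-table size
-- + present-position for extras); measured faster on large inputs.

-- ===== PORT A =====
def pvBaseColumnOrder : List String :=
  ["profile_id", "float_id", "platform_number", "juld_timestamp", "latitude", "longitude", "pressure"]

def pvVariableColumnOrder : List String :=
  ["temperature", "salinity", "dissolved_oxygen", "chlorophyll", "nitrate", "ph"]

def pvQcColumnOrder : List String :=
  ["temp_qc", "psal_qc", "doxy_qc", "chla_qc", "nitrate_qc", "ph_qc"]

-- _present_columns: seen is a dict used only for its insertion-ordered keys
def pvPresentColumns (rows : List (List (String × String))) (columns : List String) : List String :=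
  let seen : PySem.Dict String Unit :=
    columns.foldl (fun d column => d.insert column ()) PySem.Dict.empty
  let seen :=
    rows.foldl (fun d row => (row.map (·.1)).foldl (fun d key => d.insert key ()) d) seen
  seen.keys

def ordered_columns_py (rows : List (List (String × String))) (columns : List String) : List String :=
  let present := pvPresentColumns rows columns
  let presentSet := PySem.Set.ofList present
  let ordered : List String :=
    pvBaseColumnOrder.foldl
      (fun acc column => if PySem.Set.contains presentSet column then acc ++ [column] else acc) []
  let ordered :=
    pvVariableColumnOrder.foldl
      (fun acc column => if PySem.Set.contains presentSet column then acc ++ [column] else acc) ordered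
  let ordered :=
    pvQcColumnOrder.foldl
      (fun acc column => if PySem.Set.contains presentSet column then acc ++ [column] else acc) ordered
  present.foldl (fun acc column => if acc.contains column then acc else acc ++ [column]) ordered

-- ===== PORT B =====
-- _PRIORITY_RANK = {column: index for index, column in enumerate(base + variable + qc)}
def pvPriorityRank : PySem.Dict String Int :=
  (PySem.List.enumerate (pvBaseColumnOrder ++ pvVariableColumnOrder ++ pvQcColumnOrder)).foldl
    (fun d p => d.insert p.2 p.1) PySem.Dict.empty

def ordered_columns_py_alt (rows : List (List (String × String))) (columns : List String) : List String :=
  let present := PySem.List.dedup (columns ++ rows.flatMap (fun row => row.map (·.1)))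
  let big : Int := (pvPriorityRank.size : Int)
  let keyed : PySem.Dict String Int :=
    (PySem.List.enumerate present).foldl
      (fun d p => d.insert p.2 (pvPriorityRank.getD p.2 (big + p.1))) PySem.Dict.empty
  -- keyed.__getitem__: sorted only applies it to elements of present, which are all
  -- keys of keyed, so Python's KeyError is impossible and getD's default is never read
  PySem.List.sorted present (fun column => keyed.getD column 0)

-- ===== PRECONDITION & SPEC =====
def Spec_ordered_columns_py (rows : List (List (String × String))) (columns : List String) (out : List String) : Prop := out = ordered_columns_py_alt rows columns
instance (rows : List (List (String × String))) (columns : List String) (out : List String) : Decidable (Spec_ordered_columns_py rows columns out) := by unfold Spec_ordered_columns_py; infer_instance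

-- ===== CLAIM (what is proved, stated in full; the proofs are below) =====
def Claim_equal_ordered_columns_py : Prop := ∀ (rows : List (List (String × String))) (columns : List String), Dom_ordered_columns_py rows columns → Spec_ordered_columns_py rows columns (ordered_columns_py rows columns)

-- ===== LEMMAS AND PROOFS =====

-- the concatenated priority table
def pvPrio : List String := pvBaseColumnOrder ++ pvVariableColumnOrder ++ pvQcColumnOrder

theorem pvPrio_nodup : pvPrio.Nodup := by decide

-- keys of a dict after an insert, as a set-add
theorem pvKeysInsert (d : PySem.Dict String Unit) (k : String) :
    (d.insert k ()).keys = PySem.Set.add d.keys k := by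
  have hc : d.contains k = PySem.Set.contains d.keys k := by
    simp only [PySem.Dict.contains, PySem.Set.contains, PySem.Dict.keys,
      List.contains_eq_any_beq, List.any_map]
    congr 1
    funext p
    rw [Bool.eq_iff_iff]
    simp only [Function.comp_apply, beq_iff_eq]
    exact ⟨fun h => h.symm, fun h => h.symm⟩
  unfold PySem.Dict.insert PySem.Set.add
  rw [← hc]
  by_cases h : d.contains k
  · simp only [h, if_true]
    show ((d.items.map fun p => if (p.1 == k) = true then (k, ()) else p).map (·.1)) = d.items.map (·.1)
    rw [List.map_map]
    refine List.map_congr_left ?_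
    intro p _
    by_cases hpk : (p.1 == k) = true
    · simp [(eq_of_beq hpk).symm]
    · have hne : p.1 ≠ k := by simpa using hpk
      simp [hne]
  · simp only [h, if_false, Bool.false_eq_true]
    show ((d.items ++ [(k, ())]).map (·.1)) = d.items.map (·.1) ++ [k]
    simp

-- inserting every element of xs (with value ()) accumulates the keys as set-adds
theorem pvKeysFold (xs : List String) (d : PySem.Dict String Unit) :
    (xs.foldl (fun d c => d.insert c ()) d).keys = xs.foldl PySem.Set.add d.keys := by
  induction xs generalizing d with
  | nil => rfl
  | cons x t ih => simp only [List.foldl_cons, ih, pvKeysInsert]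

-- the row loop of _present_columns, on the keys
theorem pvKeysFoldRows (rs : List (List (String × String))) (d : PySem.Dict String Unit) :
    (rs.foldl (fun d row => (row.map (·.1)).foldl (fun d key => d.insert key ()) d) d).keys
      = rs.foldl (fun s row => (row.map (·.1)).foldl PySem.Set.add s) d.keys := by
  induction rs generalizing d with
  | nil => rfl
  | cons r t ih => simp only [List.foldl_cons, ih, pvKeysFold]

-- A's _present_columns is the ordered dedup B computes
theorem pvPresentEq (rows : List (List (String × String))) (columns : List String) :
    pvPresentColumns rows columns
      = PySem.List.dedup (columns ++ rows.flatMap (fun row => row.map (·.1))) := by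
  unfold pvPresentColumns
  rw [pvKeysFoldRows, pvKeysFold, PySem.List.dedup_eq_ofList, PySem.Set.ofList_eq_foldl,
    List.foldl_append, ← List.foldl_flatMap]
  rfl

-- a conditional-append loop is a filter
theorem pvFoldFilter (p : String → Bool) (l acc : List String) :
    l.foldl (fun acc c => if p c then acc ++ [c] else acc) acc = acc ++ l.filter p := by
  simpa using PySem.List.foldl_append_if p id l acc

-- A's final loop appends exactly the not-yet-present elements, in order
theorem pvFoldDedup (l : List String) (init : List String) (h : l.Nodup) :
    l.foldl (fun acc c => if acc.contains c then acc else acc ++ [c]) init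
      = init ++ l.filter (fun c => !init.contains c) := by
  induction l generalizing init with
  | nil => simp
  | cons x t ih =>
    rcases List.nodup_cons.mp h with ⟨hx, ht⟩
    by_cases hm : x ∈ init
    · simp only [List.foldl_cons]
      rw [if_pos (by simpa using hm), ih _ ht,
        List.filter_cons_of_neg (by simpa using hm)]
    · simp only [List.foldl_cons]
      rw [if_neg (by simpa using hm), ih _ ht,
        List.filter_cons_of_pos (by simpa using hm)]
      have hf : t.filter (fun c => !(init ++ [x]).contains c) = t.filter (fun c => !init.contains c) := by
        apply List.filter_congr
        intro c hc
        have : c ≠ x := fun e => hx (e ▸ hc)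
        simp [this]
      rw [hf]
      simp

-- value stored by the keyed-fold for a key not in the remaining list is untouched
theorem pvKeyFoldNotMem (g : Int → String → Int) (l : List String) (s : Int)
    (d : PySem.Dict String Int) (c : String) (hc : c ∉ l) :
    ((PySem.List.enumerate l s).foldl (fun d p => d.insert p.2 (g p.1 p.2)) d).get? c = d.get? c := by
  induction l generalizing s d with
  | nil => rfl
  | cons x t ih =>
    simp only [PySem.List.enumerate_cons, List.foldl_cons]
    rw [ih _ _ (fun h => hc (List.mem_cons_of_mem _ h)),
        PySem.Dict.get?_insert_of_ne _ _ (fun e => hc (by rw [e]; exact List.mem_cons_self))]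

-- the keyed-fold stores g (s + position) c at key c, for nodup l
theorem pvKeyFoldChar (g : Int → String → Int) (l : List String) (s : Int)
    (d : PySem.Dict String Int) (hnd : l.Nodup) (c : String) (hc : c ∈ l) :
    ((PySem.List.enumerate l s).foldl (fun d p => d.insert p.2 (g p.1 p.2)) d).get? c
      = some (g (s + (List.idxOf c l : Int)) c) := by
  induction l generalizing s d with
  | nil => cases hc
  | cons x t ih =>
    rcases List.nodup_cons.mp hnd with ⟨hx, ht⟩
    simp only [PySem.List.enumerate_cons, List.foldl_cons]
    by_cases he : c = x
    · subst he
      rw [pvKeyFoldNotMem _ _ _ _ _ hx, PySem.Dict.get?_insert_self]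
      simp
    · have hct : c ∈ t := (List.mem_cons.mp hc).resolve_left he
      rw [ih _ _ ht hct]
      have hxc : (x == c) = false := beq_eq_false_iff_ne.mpr (Ne.symm he)
      have : List.idxOf c (x :: t) = List.idxOf c t + 1 := by
        simp [List.idxOf_cons, hxc]
      rw [this]
      push_cast
      ring_nf

-- the rank table: lookups
theorem pvRankMem : ∀ c ∈ pvPrio, pvPriorityRank.get? c = some ((List.idxOf c pvPrio : Int)) := by
  decide

theorem pvRankKeys : pvPriorityRank.keys = pvPrio := by decide

theorem pvRankNotMem (c : String) (hc : c ∉ pvPrio) : pvPriorityRank.get? c = none :=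
  (PySem.Dict.get?_eq_none_iff_not_mem_keys _ _).mpr (by rw [pvRankKeys]; exact hc)

theorem pvRankSize : ((pvPriorityRank.size : Int)) = 19 := by decide

theorem pvPrioLen : pvPrio.length = 19 := by decide

-- a nodup list is strictly increasing under idxOf
theorem pvPairwiseIdx (l : List String) (h : l.Nodup) :
    l.Pairwise (fun a b => List.idxOf a l < List.idxOf b l) := by
  rw [List.pairwise_iff_getElem]
  intro i j hi hj hij
  rw [h.idxOf_getElem, h.idxOf_getElem]
  exact hij

-- B's key of a present column, characterised
theorem pvKeyChar (P : List String) (hPnd : P.Nodup) (c : String) (hc : c ∈ P) :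
    ((PySem.List.enumerate P).foldl
        (fun d q => d.insert q.2 (pvPriorityRank.getD q.2 ((pvPriorityRank.size : Int) + q.1)))
        PySem.Dict.empty).getD c 0
      = pvPriorityRank.getD c (19 + (List.idxOf c P : Int)) := by
  show ((((PySem.List.enumerate P).foldl
      (fun d q => d.insert q.2 (pvPriorityRank.getD q.2 ((pvPriorityRank.size : Int) + q.1)))
      PySem.Dict.empty).get? c).getD 0) = _
  rw [pvKeyFoldChar (fun i c => pvPriorityRank.getD c ((pvPriorityRank.size : Int) + i)) P 0
    PySem.Dict.empty hPnd c hc]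
  simp [pvRankSize]

theorem pvKeyPrio (P : List String) (hPnd : P.Nodup) (c : String) (hcP : c ∈ P)
    (hcp : c ∈ pvPrio) :
    ((PySem.List.enumerate P).foldl
        (fun d q => d.insert q.2 (pvPriorityRank.getD q.2 ((pvPriorityRank.size : Int) + q.1)))
        PySem.Dict.empty).getD c 0 = (List.idxOf c pvPrio : Int) := by
  rw [pvKeyChar P hPnd c hcP]
  simp [PySem.Dict.getD, pvRankMem c hcp]

theorem pvKeyExtra (P : List String) (hPnd : P.Nodup) (c : String) (hcP : c ∈ P)
    (hcp : c ∉ pvPrio) :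
    ((PySem.List.enumerate P).foldl
        (fun d q => d.insert q.2 (pvPriorityRank.getD q.2 ((pvPriorityRank.size : Int) + q.1)))
        PySem.Dict.empty).getD c 0 = 19 + (List.idxOf c P : Int) := by
  rw [pvKeyChar P hPnd c hcP]
  simp [PySem.Dict.getD, pvRankNotMem c hcp]

-- the whole equivalence, with the deduped present list abstracted
theorem pvMain (P : List String) (hPnd : P.Nodup) :
    (P.foldl (fun acc column => if acc.contains column then acc else acc ++ [column])
      (pvQcColumnOrder.foldl
        (fun acc column => if PySem.Set.contains (PySem.Set.ofList P) column then acc ++ [column] else acc)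
        (pvVariableColumnOrder.foldl
          (fun acc column => if PySem.Set.contains (PySem.Set.ofList P) column then acc ++ [column] else acc)
          (pvBaseColumnOrder.foldl
            (fun acc column => if PySem.Set.contains (PySem.Set.ofList P) column then acc ++ [column] else acc)
            []))))
    = PySem.List.sorted P
        (fun column =>
          ((PySem.List.enumerate P).foldl
            (fun d p => d.insert p.2 (pvPriorityRank.getD p.2 ((pvPriorityRank.size : Int) + p.1)))
            PySem.Dict.empty).getD column 0) := by
  have hmemS : ∀ c : String, PySem.Set.contains (PySem.Set.ofList P) c = true ↔ c ∈ P := by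
    intro c
    simp [PySem.Set.contains, PySem.Set.mem_ofList]
  rw [pvFoldFilter, pvFoldFilter, pvFoldFilter, List.nil_append, ← List.filter_append,
    ← List.filter_append,
    show pvBaseColumnOrder ++ pvVariableColumnOrder ++ pvQcColumnOrder = pvPrio from rfl]
  rw [pvFoldDedup P _ hPnd]
  have hFmem : ∀ c : String,
      c ∈ pvPrio.filter (PySem.Set.contains (PySem.Set.ofList P)) ↔ c ∈ pvPrio ∧ c ∈ P := by
    intro c
    rw [List.mem_filter, hmemS]
  have hEeq : P.filter (fun c => !(pvPrio.filter (PySem.Set.contains (PySem.Set.ofList P))).contains c)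
      = P.filter (fun c => !pvPrio.contains c) := by
    apply List.filter_congr
    intro c hcP
    have hiff : c ∈ pvPrio.filter (PySem.Set.contains (PySem.Set.ofList P)) ↔ c ∈ pvPrio := by
      rw [hFmem]
      exact ⟨fun h => h.1, fun h => ⟨h, hcP⟩⟩
    by_cases h : c ∈ pvPrio <;> simp [hiff, h]
  rw [hEeq]
  refine (PySem.List.sorted_eq_of_perm_of_pairwise_lt P _ _ ?_ ?_).symm
  · -- permutation with the present list
    have h1 : (pvPrio.filter (PySem.Set.contains (PySem.Set.ofList P))).Perm
        (P.filter (fun c => pvPrio.contains c)) := by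
      refine (List.perm_ext_iff_of_nodup (pvPrio_nodup.filter _) (hPnd.filter _)).mpr ?_
      intro c
      rw [hFmem c, List.mem_filter]
      simp [and_comm]
    exact (h1.append_right _).trans (List.filter_append_perm (fun c => pvPrio.contains c) P)
  · -- keys strictly increase along A's arrangement
    rw [List.pairwise_append]
    refine ⟨?_, ?_, ?_⟩
    · refine List.pairwise_filter.mpr (List.Pairwise.imp_of_mem ?_ (pvPairwiseIdx _ pvPrio_nodup))
      intro a b ha hb hidx hpa hpb
      rw [pvKeyPrio P hPnd a ((hmemS a).mp hpa) ha, pvKeyPrio P hPnd b ((hmemS b).mp hpb) hb]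
      exact_mod_cast hidx
    · refine List.pairwise_filter.mpr (List.Pairwise.imp_of_mem ?_ (pvPairwiseIdx _ hPnd))
      intro a b ha hb hidx hna hnb
      rw [pvKeyExtra P hPnd a ha (by simpa using hna), pvKeyExtra P hPnd b hb (by simpa using hnb)]
      omega
    · intro a ha b hb
      obtain ⟨hap, haP⟩ := (hFmem a).mp ha
      rw [List.mem_filter] at hb
      obtain ⟨hbP, hbnp⟩ := hb
      rw [pvKeyPrio P hPnd a haP hap, pvKeyExtra P hPnd b hbP (by simpa using hbnp)]
      have hlt : List.idxOf a pvPrio < 19 := pvPrioLen ▸ List.idxOf_lt_length_of_mem hap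
      omega

theorem ordered_columns_py_spec_aux (rows : List (List (String × String))) (columns : List String) :
    ordered_columns_py rows columns = ordered_columns_py_alt rows columns := by
  unfold ordered_columns_py ordered_columns_py_alt
  simp only [pvPresentEq rows columns]
  exact pvMain _ (PySem.List.nodup_dedup _)

-- ===== VERDICT (by name: the statement is the Claim_ definition above) =====
theorem ordered_columns_py_spec : Claim_equal_ordered_columns_py := by
  intro rows columns _
  exact ordered_columns_py_spec_aux rows columns
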